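-- pv_equiv track=rewrite | github.com/slptongji/GERP | data_utils/prepare_dialogue_data.py | filter_test_peld_sentence_length
-- ===== SOURCE A (Python) =====
-- def is_valid_sen(data, min_len, max_len):
--     if (len(data) > min_len) and (len(data) <= max_len):
--         return True
--     else:
--         return False
--
-- def filter_test_peld_sentence_length(utt1_data, utt2_data,emo1_data,emo2_data,person_data, min_len, max_len):
--     new_utt1, new_utt2,new_emo1,new_emo2,new_per = [], [],[],[],[]
--     for utt1, utt2,emo1,emo2,person in zip(utt1_data, utt2_data,emo1_data,emo2_data,person_data):
--         if is_valid_sen(utt1, min_len, max_len) and is_valid_sen(utt2,min_len,max_len):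
--             new_utt1.append(utt1)
--             new_utt2.append(utt2)
--             new_emo1.append(emo1)
--             new_emo2.append(emo2)
--             new_per.append(person)
--     return new_utt1, new_utt2,new_emo1,new_emo2,new_per
-- ===== SOURCE B (Python) =====
-- def is_valid_sen(data, min_len, max_len):
--     if (len(data) > min_len) and (len(data) <= max_len):
--         return True
--     else:
--         return False
--
-- def filter_test_peld_sentence_length(utt1_data, utt2_data, emo1_data, emo2_data, person_data, min_len, max_len):
--     # one pass to build a keep-mask, then one selection pass per output list
--     n = min(len(utt1_data), len(utt2_data), len(emo1_data), len(emo2_data), len(person_data))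
--     mask = [is_valid_sen(a, min_len, max_len) and is_valid_sen(b, min_len, max_len)
--             for a, b in zip(utt1_data[:n], utt2_data[:n])]
--     def pick(xs):
--         return [x for x, keep in zip(xs, mask) if keep]
--     return pick(utt1_data), pick(utt2_data), pick(emo1_data), pick(emo2_data), pick(person_data)
-- ===== Notes on version B (the rewrite author's own statement) =====
-- stated objective: alternative
-- what changed: Instead of one loop over the zipped quintuple appending to five accumulators, B precomputes a boolean keep-mask from the two utterance lists in one pass and then builds each of the five outputs by its own mask-selection pass.
import Mathlib
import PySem

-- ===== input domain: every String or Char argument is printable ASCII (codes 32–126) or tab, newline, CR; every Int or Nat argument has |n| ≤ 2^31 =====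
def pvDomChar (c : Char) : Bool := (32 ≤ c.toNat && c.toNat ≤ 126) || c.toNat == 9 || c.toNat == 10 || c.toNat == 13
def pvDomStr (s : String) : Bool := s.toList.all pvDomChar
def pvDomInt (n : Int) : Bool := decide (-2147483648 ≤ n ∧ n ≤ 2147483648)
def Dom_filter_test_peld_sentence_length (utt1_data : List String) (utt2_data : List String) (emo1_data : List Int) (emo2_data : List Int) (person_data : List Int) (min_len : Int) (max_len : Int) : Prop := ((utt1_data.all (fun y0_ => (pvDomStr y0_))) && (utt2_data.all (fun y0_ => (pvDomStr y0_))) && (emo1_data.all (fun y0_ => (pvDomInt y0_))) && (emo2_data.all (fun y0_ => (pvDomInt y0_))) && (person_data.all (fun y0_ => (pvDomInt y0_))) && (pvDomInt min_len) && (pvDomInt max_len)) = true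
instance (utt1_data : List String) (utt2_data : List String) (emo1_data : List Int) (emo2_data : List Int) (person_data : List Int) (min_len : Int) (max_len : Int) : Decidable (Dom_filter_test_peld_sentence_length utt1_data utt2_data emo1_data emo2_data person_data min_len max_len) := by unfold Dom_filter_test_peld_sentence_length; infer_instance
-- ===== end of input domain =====

-- B replaces A's single append-to-five-accumulators loop by a precomputed keep-mask
-- plus one selection pass per output list (objective: alternative decomposition, same cost).

-- ===== PORT A =====
-- is_valid_sen, transliterated
def isValidSen (data : String) (min_len max_len : Int) : Bool :=
  if PySem.Str.len data > min_len ∧ PySem.Str.len data ≤ max_len then true else false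

-- the `for … in zip(…)` loop with its five accumulators, as structural recursion
def filterLoop (u1s u2s : List String) (e1s e2s ps : List Int) (min_len max_len : Int) :
    List String × List String × List Int × List Int × List Int :=
  match u1s, u2s, e1s, e2s, ps with
  | u1 :: t1, u2 :: t2, e1 :: t3, e2 :: t4, p :: t5 =>
    let rest := filterLoop t1 t2 t3 t4 t5 min_len max_len
    if isValidSen u1 min_len max_len && isValidSen u2 min_len max_len then
      (u1 :: rest.1, u2 :: rest.2.1, e1 :: rest.2.2.1, e2 :: rest.2.2.2.1, p :: rest.2.2.2.2)
    else rest
  | _, _, _, _, _ => ([], [], [], [], [])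

def filter_test_peld_sentence_length (utt1_data : List String) (utt2_data : List String) (emo1_data : List Int) (emo2_data : List Int) (person_data : List Int) (min_len : Int) (max_len : Int) : List String × List String × List Int × List Int × List Int :=
  filterLoop utt1_data utt2_data emo1_data emo2_data person_data min_len max_len

-- ===== PORT B =====
-- the keep-mask built in one pass over the two (truncated) utterance lists
def keepMask (u1s u2s : List String) (n : Nat) (min_len max_len : Int) : List Bool :=
  ((u1s.take n).zip (u2s.take n)).map
    (fun ab => isValidSen ab.1 min_len max_len && isValidSen ab.2 min_len max_len)

-- `[x for x, keep in zip(xs, mask) if keep]`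
def pickMask {α : Type} (xs : List α) (mask : List Bool) : List α :=
  (xs.zip mask).filterMap (fun xk => if xk.2 then some xk.1 else none)

def filter_test_peld_sentence_length_alt (utt1_data : List String) (utt2_data : List String) (emo1_data : List Int) (emo2_data : List Int) (person_data : List Int) (min_len : Int) (max_len : Int) : List String × List String × List Int × List Int × List Int :=
  let n := min (min (min (min utt1_data.length utt2_data.length) emo1_data.length) emo2_data.length) person_data.length
  let mask := keepMask utt1_data utt2_data n min_len max_len
  (pickMask utt1_data mask, pickMask utt2_data mask, pickMask emo1_data mask,
   pickMask emo2_data mask, pickMask person_data mask)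

-- ===== PRECONDITION & SPEC =====
def Spec_filter_test_peld_sentence_length (utt1_data : List String) (utt2_data : List String) (emo1_data : List Int) (emo2_data : List Int) (person_data : List Int) (min_len : Int) (max_len : Int) (out : List String × List String × List Int × List Int × List Int) : Prop := out = filter_test_peld_sentence_length_alt utt1_data utt2_data emo1_data emo2_data person_data min_len max_len
instance (utt1_data : List String) (utt2_data : List String) (emo1_data : List Int) (emo2_data : List Int) (person_data : List Int) (min_len : Int) (max_len : Int) (out : List String × List String × List Int × List Int × List Int) : Decidable (Spec_filter_test_peld_sentence_length utt1_data utt2_data emo1_data emo2_data person_data min_len max_len out) := by unfold Spec_filter_test_peld_sentence_length; infer_instance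

-- ===== CLAIM (what is proved, stated in full; the proofs are below) =====
def Claim_equal_filter_test_peld_sentence_length : Prop := ∀ (utt1_data : List String) (utt2_data : List String) (emo1_data : List Int) (emo2_data : List Int) (person_data : List Int) (min_len : Int) (max_len : Int), Dom_filter_test_peld_sentence_length utt1_data utt2_data emo1_data emo2_data person_data min_len max_len → Spec_filter_test_peld_sentence_length utt1_data utt2_data emo1_data emo2_data person_data min_len max_len (filter_test_peld_sentence_length utt1_data utt2_data emo1_data emo2_data person_data min_len max_len)

-- ===== LEMMAS AND PROOFS =====
theorem pickMask_nil_mask {α : Type} (xs : List α) : pickMask xs [] = [] := by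
  cases xs <;> rfl

theorem pickMask_cons {α : Type} (x : α) (xs : List α) (k : Bool) (ks : List Bool) :
    pickMask (x :: xs) (k :: ks) = if k then x :: pickMask xs ks else pickMask xs ks := by
  cases k <;> simp [pickMask, List.filterMap_cons]

theorem filterLoop_eq_alt (min_len max_len : Int) :
    ∀ (u1s u2s : List String) (e1s e2s ps : List Int),
      filterLoop u1s u2s e1s e2s ps min_len max_len =
      filter_test_peld_sentence_length_alt u1s u2s e1s e2s ps min_len max_len := by
  intro u1s
  induction u1s with
  | nil =>
    intro u2s e1s e2s ps
    simp [filterLoop, filter_test_peld_sentence_length_alt, keepMask, pickMask_nil_mask]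
  | cons u1 t1 ih =>
    intro u2s e1s e2s ps
    cases u2s with
    | nil => simp [filterLoop, filter_test_peld_sentence_length_alt, keepMask, pickMask_nil_mask]
    | cons u2 t2 =>
      cases e1s with
      | nil => simp [filterLoop, filter_test_peld_sentence_length_alt, keepMask, pickMask_nil_mask]
      | cons e1 t3 =>
        cases e2s with
        | nil => simp [filterLoop, filter_test_peld_sentence_length_alt, keepMask, pickMask_nil_mask]
        | cons e2 t4 =>
          cases ps with
          | nil => simp [filterLoop, filter_test_peld_sentence_length_alt, keepMask, pickMask_nil_mask]
          | cons p t5 =>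
            have h := ih t2 t3 t4 t5
            simp only [filterLoop, filter_test_peld_sentence_length_alt, keepMask,
              List.length_cons, Nat.succ_min_succ, List.take_succ_cons, List.zip_cons_cons,
              List.map_cons, pickMask_cons] at h ⊢
            rw [h]
            split <;> simp

-- ===== VERDICT (by name: the statement is the Claim_ definition above) =====
theorem filter_test_peld_sentence_length_spec : Claim_equal_filter_test_peld_sentence_length := by
  intro u1s u2s e1s e2s ps m M _
  unfold Spec_filter_test_peld_sentence_length filter_test_peld_sentence_length
  exact filterLoop_eq_alt m M u1s u2s e1s e2s ps
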